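-- pv_equiv track=rewrite | github.com/WillMc93/AS.605.620 | discussion1.py | gen_masks
-- ===== SOURCE A (Python) =====
-- def gen_masks(n):
-- 	# generate the masks
--
-- 	# start w/ binary 1 (01)
-- 	# it's important that this starts with False becasue we really only need half the possiblities
-- 	masks = [[False, True]]
--
-- 	# create binary numbers of length n
-- 	for i in range(2, n):
-- 		# need to store the generated masks separately temporarily
-- 		new_masks = []
--
-- 		# for each already generated mask
-- 		for mask in masks:
-- 			if len(mask) == i:
-- 				# for each mask of the current length
-- 				# add the succeeding even number: current mask + a zero (False) at the end
-- 				even_mask = mask + [False]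
--
-- 				# add the succedding odd number: mask + a one (True) at the end
-- 				odd_mask = mask + [True]
--
-- 				# store in temporary space
-- 				new_masks.append(even_mask)
-- 				new_masks.append(odd_mask)
--
-- 		# add temporary space to persistent space
-- 		masks += new_masks
--
-- 	# remove the all-true mask (last one)
-- 	masks = masks[:len(masks) - 1]
--
-- 	# prepend the correct number of False's to the shorties
-- 	prepd_masks = []
-- 	for mask in masks:
-- 		prepend = [False for _ in range(n - len(mask))]
--
-- 		prepd_masks.append(prepend + mask)
--
-- 	return prepd_masks
-- ===== SOURCE B (Python) =====
-- def gen_masks(n):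
--     # Enumerate each mask row directly: for each length L, the suffix bits of s (MSB first).
--     masks = []
--     for L in range(2, n + 1):
--         for s in range(2 ** (L - 2)):
--             suffix = [bool((s >> (L - 3 - k)) & 1) for k in range(L - 2)]
--             masks.append([False] * (n - L) + [False, True] + suffix)
--     return masks[:-1]
-- ===== Notes on version B (the rewrite author's own statement) =====
-- stated objective: simpler
-- what changed: Instead of growing masks generation by generation (BFS append of children, then a separate prepend pass), B enumerates each output row directly by length L and suffix value s, reading the bits of s arithmetically; the seed stripping becomes a single [:-1].
import Mathlib
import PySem

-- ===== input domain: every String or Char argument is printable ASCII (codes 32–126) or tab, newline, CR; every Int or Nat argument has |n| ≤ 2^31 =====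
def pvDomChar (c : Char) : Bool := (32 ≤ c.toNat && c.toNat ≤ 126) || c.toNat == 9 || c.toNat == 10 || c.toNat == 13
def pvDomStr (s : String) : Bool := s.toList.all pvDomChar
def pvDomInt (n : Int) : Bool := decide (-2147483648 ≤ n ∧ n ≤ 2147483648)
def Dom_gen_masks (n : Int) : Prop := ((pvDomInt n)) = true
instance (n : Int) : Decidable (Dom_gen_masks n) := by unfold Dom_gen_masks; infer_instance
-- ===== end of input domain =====

-- B enumerates each output row directly by length and suffix value instead of A's
-- generation-by-generation growth plus a separate prepend pass (objective: simpler).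

-- ===== PORT A =====
def gen_masks (n : Int) : List (List Bool) :=
  -- masks = [[False, True]]; for i in range(2, n): grow, then strip last, then prepend pad
  let masks₁ := (PySem.List.pyRange 2 n 1).foldl
    (fun masks i =>
      masks ++ masks.foldl
        (fun new_masks mask =>
          if (mask.length : Int) = i then
            new_masks ++ [mask ++ [false]] ++ [mask ++ [true]]
          else new_masks) [])
    [[false, true]]
  let masks₂ := masks₁.take (masks₁.length - 1)
  masks₂.foldl
    (fun prepd mask =>
      prepd ++ [((PySem.List.pyRange 0 (n - mask.length) 1).map (fun _ => false)) ++ mask]) []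

-- ===== PORT B =====
def gen_masks_alt (n : Int) : List (List Bool) :=
  -- for L in range(2, n+1): for s in range(2**(L-2)): append pad + [F,T] + bits of s; drop last
  let masks := (PySem.List.pyRange 2 (n + 1) 1).foldl
    (fun masks L =>
      (PySem.List.pyRange 0 ((2 : Int) ^ (L - 2).toNat) 1).foldl
        (fun masks s =>
          masks ++ [List.replicate (n - L).toNat false ++ [false, true] ++
            (PySem.List.pyRange 0 (L - 2) 1).map
              (fun k => decide (s.toNat >>> (L - 3 - k).toNat &&& 1 = 1))])
        masks)
    []
  masks.dropLast

-- ===== PRECONDITION & SPEC =====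
def Spec_gen_masks (n : Int) (out : List (List Bool)) : Prop := out = gen_masks_alt n
instance (n : Int) (out : List (List Bool)) : Decidable (Spec_gen_masks n out) := by unfold Spec_gen_masks; infer_instance

-- ===== CLAIM (what is proved, stated in full; the proofs are below) =====
def Claim_equal_gen_masks : Prop := ∀ (n : Int), Dom_gen_masks n → Spec_gen_masks n (gen_masks n)

-- ===== LEMMAS AND PROOFS =====

-- the j-th (MSB-first) bit of s, and the k-bit MSB-first expansion of s
def pvBitf (s e : Nat) : Bool := decide (s / 2 ^ e % 2 = 1)
def pvBits (k s : Nat) : List Bool := (List.range k).map (fun j => pvBitf s (k - 1 - j))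

-- A's generations: rowA k = the masks of length k+2, in A's order
def rowA : Nat → List (List Bool)
  | 0 => [[false, true]]
  | k + 1 => (rowA k).flatMap (fun m => [m ++ [false], m ++ [true]])

def rows (m : Nat) : List (List Bool) := (List.range m).flatMap rowA

def pvPad (n : Int) (m : List Bool) : List Bool := List.replicate (n - (m.length : Int)).toNat false ++ m

lemma rowA_length {k : Nat} {m : List Bool} (h : m ∈ rowA k) : m.length = k + 2 := by
  induction k generalizing m with
  | zero => simp [rowA] at h; simp [h]
  | succ k ih =>
    simp only [rowA, List.mem_flatMap] at h
    obtain ⟨m', hm', h⟩ := h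
    have := ih hm'
    simp only [List.mem_cons] at h
    rcases h with rfl | rfl | h <;> simp_all

lemma pvBits_succ (k s : Nat) : pvBits (k + 1) s = pvBits k (s / 2) ++ [decide (s % 2 = 1)] := by
  unfold pvBits
  rw [List.range_succ, List.map_append]
  congr 1
  · apply List.map_congr_left
    intro j hj
    rw [List.mem_range] at hj
    unfold pvBitf
    have he : k + 1 - 1 - j = (k - 1 - j) + 1 := by omega
    rw [he, pow_succ, mul_comm, ← Nat.div_div_eq_div_mul]
  · simp [pvBitf]

lemma range_double (m : Nat) (f : Nat → List Bool) :
    (List.range (2 * m)).map f = (List.range m).flatMap (fun s => [f (2 * s), f (2 * s + 1)]) := by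
  induction m with
  | zero => simp
  | succ m ih =>
    have he : 2 * (m + 1) = (2 * m + 1) + 1 := by ring
    rw [he, List.range_succ, List.range_succ, List.map_append, List.map_append, ih,
      List.range_succ, List.flatMap_append]
    simp

lemma rowA_eq (k : Nat) : rowA k = (List.range (2 ^ k)).map (fun s => [false, true] ++ pvBits k s) := by
  induction k with
  | zero => simp [rowA, pvBits]
  | succ k ih =>
    have hp : 2 ^ (k + 1) = 2 * 2 ^ k := by ring
    rw [rowA, ih, hp, range_double, List.flatMap_map]
    apply List.flatMap_congr
    intro s _
    have hev : pvBits (k + 1) (2 * s) = pvBits k s ++ [false] := by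
      rw [pvBits_succ]
      simp [Nat.mul_mod_right]
    have hod : pvBits (k + 1) (2 * s + 1) = pvBits k s ++ [true] := by
      rw [pvBits_succ]
      have h1 : (2 * s + 1) / 2 = s := by omega
      have h2 : (2 * s + 1) % 2 = 1 := by omega
      rw [h1, h2]
      simp
    simp [hev, hod]

lemma inner_eq (i : Int) (masks acc : List (List Bool)) :
    masks.foldl
      (fun new_masks mask =>
        if (mask.length : Int) = i then
          new_masks ++ [mask ++ [false]] ++ [mask ++ [true]]
        else new_masks) acc
    = acc ++ masks.flatMap (fun m => if (m.length : Int) = i then [m ++ [false], m ++ [true]] else []) := by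
  induction masks generalizing acc with
  | nil => simp
  | cons m ms ih => simp only [List.foldl_cons, List.flatMap_cons, ih]; split <;> simp

lemma rows_child (j : Nat) :
    (rows (j + 1)).flatMap
      (fun m => if (m.length : Int) = 2 + (j : Int) then [m ++ [false], m ++ [true]] else [])
    = rowA (j + 1) := by
  unfold rows
  rw [List.flatMap_assoc, List.range_succ, List.flatMap_append, List.flatMap_singleton]
  have h0 : (List.range j).flatMap
      (fun k => (rowA k).flatMap
        (fun m => if (m.length : Int) = 2 + (j : Int) then [m ++ [false], m ++ [true]] else [])) = [] := by
    rw [List.flatMap_eq_nil_iff]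
    intro k hk
    rw [List.mem_range] at hk
    rw [List.flatMap_eq_nil_iff]
    intro m hm
    have hl := rowA_length hm
    have : ¬ ((m.length : Int) = 2 + (j : Int)) := by
      rw [hl]; push_cast; omega
    simp [this]
  rw [h0, List.nil_append]
  have h1 : (rowA j).flatMap
      (fun m => if (m.length : Int) = 2 + (j : Int) then [m ++ [false], m ++ [true]] else [])
      = (rowA j).flatMap (fun m => [m ++ [false], m ++ [true]]) := by
    apply List.flatMap_congr
    intro m hm
    have hl := rowA_length hm
    have : (m.length : Int) = 2 + (j : Int) := by rw [hl]; push_cast; ring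
    simp [this]
  rw [h1]
  rfl

lemma loopA (j : Nat) :
    ((List.range j).map (fun k : Nat => 2 + (k : Int))).foldl
      (fun masks i =>
        masks ++ masks.foldl
          (fun new_masks mask =>
            if (mask.length : Int) = i then
              new_masks ++ [mask ++ [false]] ++ [mask ++ [true]]
            else new_masks) [])
      [[false, true]]
    = rows (j + 1) := by
  induction j with
  | zero => simp [rows, rowA]
  | succ j ih =>
    rw [List.range_succ, List.map_append, List.foldl_append, ih]
    simp only [List.map_cons, List.map_nil, List.foldl_cons, List.foldl_nil]
    rw [inner_eq, List.nil_append, rows_child]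
    show rows (j + 1) ++ rowA (j + 1) = _
    unfold rows
    rw [List.range_succ (n := j + 1), List.flatMap_append, List.flatMap_singleton]

lemma rowB (n : Int) (k : Nat) :
    (PySem.List.pyRange 0 ((2 : Int) ^ ((2 + (k : Int)) - 2).toNat) 1).map
      (fun s => List.replicate (n - (2 + (k : Int))).toNat false ++ [false, true] ++
        (PySem.List.pyRange 0 ((2 + (k : Int)) - 2) 1).map
          (fun kk => decide (s.toNat >>> ((2 + (k : Int)) - 3 - kk).toNat &&& 1 = 1)))
    = (rowA k).map (pvPad n) := by
  have h2 : (2 + (k : Int)) - 2 = (k : Int) := by ring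
  simp only [h2, PySem.List.pyRange_one, sub_zero, Int.toNat_natCast]
  rw [show ((2 : Int) ^ k).toNat = 2 ^ k by
    rw [show ((2 : Int) ^ k) = ((2 ^ k : Nat) : Int) by push_cast; ring]
    exact Int.toNat_natCast _]
  rw [List.map_map, rowA_eq k, List.map_map]
  apply List.map_congr_left
  intro s _
  simp only [Function.comp]
  unfold pvPad
  have hpad : (n - ((([false, true] ++ pvBits k s).length : Nat) : Int)).toNat
      = (n - (2 + (k : Int))).toNat := by
    simp [pvBits]; omega
  rw [hpad, List.append_assoc]
  congr 2
  rw [List.map_map]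
  unfold pvBits
  apply List.map_congr_left
  intro j hj
  rw [List.mem_range] at hj
  simp only [Function.comp]
  have ht : ((2 + (k : Int)) - 3 - (0 + (j : Int))).toNat = k - 1 - j := by omega
  have hs : ((0 : Int) + (s : Int)).toNat = s := by omega
  rw [ht, hs, Nat.shiftRight_eq_div_pow, Nat.and_one_is_mod]
  rfl

lemma genA_eq (n : Int) :
    gen_masks n = ((rows ((n - 2).toNat + 1)).map (pvPad n)).dropLast := by
  simp only [gen_masks]
  rw [PySem.List.pyRange_one, loopA, ← List.dropLast_eq_take,
    PySem.List.foldl_append_singleton_eq_map, List.nil_append]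
  have hf : (fun mask : List Bool =>
      ((PySem.List.pyRange 0 (n - (mask.length : Int)) 1).map (fun _ => false)) ++ mask)
      = pvPad n := by
    funext m
    rw [PySem.List.pyRange_one, List.map_const']
    simp [pvPad]
  rw [hf, List.map_dropLast]

lemma genB_eq (n : Int) (h : 2 ≤ n) :
    gen_masks_alt n = ((rows ((n - 2).toNat + 1)).map (pvPad n)).dropLast := by
  simp only [gen_masks_alt]
  rw [PySem.List.pyRange_one]
  have hN : (n + 1 - 2).toNat = (n - 2).toNat + 1 := by omega
  rw [hN]
  simp only [PySem.List.foldl_append_singleton_eq_map]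
  rw [PySem.List.foldl_append_eq_flatMap, List.nil_append, List.flatMap_map]
  have hR : (rows ((n - 2).toNat + 1)).map (pvPad n)
      = (List.range ((n - 2).toNat + 1)).flatMap (fun k => (rowA k).map (pvPad n)) := by
    rw [rows, List.map_flatMap]
  rw [hR]
  congr 1
  apply List.flatMap_congr
  intro k _
  exact rowB n k

-- ===== VERDICT (by name: the statement is the Claim_ definition above) =====
theorem gen_masks_spec : Claim_equal_gen_masks := by
  intro n _
  unfold Spec_gen_masks
  by_cases h : 2 ≤ n
  · rw [genA_eq, genB_eq n h]
  · -- n ≤ 1: both loops are empty; A strips its seed, B never creates one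
    have h1 : (n - 2).toNat = 0 := by omega
    rw [genA_eq, h1]
    simp [gen_masks_alt, PySem.List.pyRange_one_eq_nil (by omega : n + 1 ≤ 2), rows, rowA]
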